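-- pv_equiv track=rewrite | github.com/omarkhaledaicom/AICOM-Realestate | services/database_manager.py | _describe_rooms
-- ===== SOURCE A (Python) =====
-- def _describe_rooms(values):
--     """Describe discrete numeric values for rooms, showing missing numbers."""
--     if not values:
--         return []
--     values = sorted(set(int(v) for v in values))
--     min_val, max_val = values[0], values[-1]
--     missing = [x for x in range(min_val, max_val + 1) if x not in values]
--     description = f"{min_val} - {max_val}"
--     if missing:
--         missing_str = ", ".join(map(str, missing))
--         description += f" (missing {missing_str})"
--     return [description]
-- ===== SOURCE B (Python) =====
-- def _describe_rooms(values):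
--     """Describe discrete numeric values for rooms, showing missing numbers."""
--     if not values:
--         return []
--     vals = sorted(set(int(v) for v in values))
--     first = vals[0]
--     prev = first
--     parts = []
--     for v in vals[1:]:
--         g = prev + 1
--         while g < v:
--             parts.append(str(g))
--             g += 1
--         prev = v
--     desc = f"{first} - {prev}"
--     if parts:
--         desc = f"{desc} (missing {', '.join(parts)})"
--     return [desc]
-- ===== Notes on version B (the rewrite author's own statement) =====
-- stated objective: faster
-- what changed: Instead of scanning every integer in range(min,max+1) and testing list membership (quadratic in the span), B does a single accumulator pass over the sorted unique values, carrying the previous value and emitting each gap's numbers as strings with an inner counting loop.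
import Mathlib
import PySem

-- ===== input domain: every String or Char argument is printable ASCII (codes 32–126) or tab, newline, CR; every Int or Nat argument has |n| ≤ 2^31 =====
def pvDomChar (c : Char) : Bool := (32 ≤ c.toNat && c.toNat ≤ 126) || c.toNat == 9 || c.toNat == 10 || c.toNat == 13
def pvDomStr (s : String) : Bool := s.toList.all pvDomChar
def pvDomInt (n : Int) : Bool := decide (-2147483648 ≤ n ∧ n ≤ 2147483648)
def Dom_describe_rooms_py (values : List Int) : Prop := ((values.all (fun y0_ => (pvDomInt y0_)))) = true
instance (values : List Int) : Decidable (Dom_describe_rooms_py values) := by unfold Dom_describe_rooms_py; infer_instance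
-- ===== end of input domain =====

-- B replaces A's membership scan over range(min,max+1) with a single accumulator pass
-- over the sorted unique values that emits each gap's numbers directly (faster).

-- ===== PORT A =====
def describe_rooms_py (values : List Int) : List String :=
  if values = [] then []
  else
    -- values = sorted(set(int(v) for v in values)); v already int, so int(v) = v
    let vs := PySem.List.sorted (PySem.Set.ofList values) (fun x => x) false
    -- vs is non-empty here, so values[0]/values[-1] cannot raise; pyGetD's default is never used
    let min_val := PySem.List.pyGetD vs 0 0
    let max_val := PySem.List.pyGetD vs (-1) 0
    let missing := (PySem.List.pyRange min_val (max_val + 1) 1).filter (fun x => !(vs.contains x))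
    let description := PySem.Str.join "" [PySem.Int.toStr min_val, " - ", PySem.Int.toStr max_val]
    let description :=
      if missing ≠ [] then
        PySem.Str.join "" [description, " (missing ",
          PySem.Str.join ", " (missing.map PySem.Int.toStr), ")"]
      else description
    [description]

-- ===== PORT B =====
-- inner 'while g < v: parts.append(str(g)); g += 1'
def pvGapStrs (g v : Int) : List String :=
  if h : g < v then PySem.Int.toStr g :: pvGapStrs (g + 1) v else []
  termination_by (v - g).toNat
  decreasing_by omega

def describe_rooms_py_alt (values : List Int) : List String :=
  if values = [] then []
  else
    let vals := PySem.List.sorted (PySem.Set.ofList values) (fun x => x) false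
    -- vals non-empty here, so vals[0] cannot raise; pyGetD's default is never used
    let first := PySem.List.pyGetD vals 0 0
    -- for v in vals[1:]: …   carrying the state (prev, parts)
    let st := (PySem.List.slice vals (some 1) none).foldl
      (fun (st : Int × List String) v => (v, st.2 ++ pvGapStrs (st.1 + 1) v)) (first, [])
    let desc := PySem.Str.join "" [PySem.Int.toStr first, " - ", PySem.Int.toStr st.1]
    let desc :=
      if st.2 ≠ [] then
        PySem.Str.join "" [desc, " (missing ", PySem.Str.join ", " st.2, ")"]
      else desc
    [desc]

-- ===== PRECONDITION & SPEC =====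
def Spec_describe_rooms_py (values : List Int) (out : List String) : Prop := out = describe_rooms_py_alt values
instance (values : List Int) (out : List String) : Decidable (Spec_describe_rooms_py values out) := by unfold Spec_describe_rooms_py; infer_instance

-- ===== CLAIM (what is proved, stated in full; the proofs are below) =====
def Claim_equal_describe_rooms_py : Prop := ∀ (values : List Int), Dom_describe_rooms_py values → Spec_describe_rooms_py values (describe_rooms_py values)

-- ===== LEMMAS AND PROOFS =====

-- the gaps of a list, pair by pair (proof-side characterisation of both loops)
def pvGaps : List Int → List Int
  | a :: b :: rest => PySem.List.pyRange (a + 1) b 1 ++ pvGaps (b :: rest)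
  | _ => []

lemma pvGapStrs_eq (g v : Int) :
    pvGapStrs g v = (PySem.List.pyRange g v 1).map PySem.Int.toStr := by
  generalize hn : (v - g).toNat = n
  induction n generalizing g with
  | zero =>
    rw [pvGapStrs, dif_neg (by omega), PySem.List.pyRange_one_eq_nil (by omega)]
    simp
  | succ n ih =>
    have h : g < v := by omega
    rw [pvGapStrs, dif_pos h, PySem.List.pyRange_one_cons h, List.map_cons,
      ih (g + 1) (by omega)]

-- B's fold over the tail computes the last element and all gap strings
lemma pvFold_eq (t : List Int) (a : Int) (acc : List String) :
    t.foldl (fun (st : Int × List String) v => (v, st.2 ++ pvGapStrs (st.1 + 1) v)) (a, acc)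
      = ((a :: t).getLastD 0, acc ++ (pvGaps (a :: t)).map PySem.Int.toStr) := by
  induction t generalizing a acc with
  | nil => simp [pvGaps]
  | cons b rest ih =>
    rw [List.foldl_cons, ih, pvGapStrs_eq]
    simp [pvGaps]

lemma pv_head_le_getLastD (b : Int) (rest : List Int) (ht : (b :: rest).Pairwise (· < ·)) :
    b ≤ (b :: rest).getLastD 0 := by
  induction rest generalizing b with
  | nil => simp
  | cons c rest' ih =>
    have hbc : b < c := (List.pairwise_cons.1 ht).1 c (by simp)
    have h2 := ih c (List.pairwise_cons.1 ht).2
    have heq : (b :: c :: rest').getLastD 0 = (c :: rest').getLastD 0 := by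
      simp
    omega

-- A's filtered range equals the concatenated gaps
lemma pvFilter_gaps (vs : List Int) (h : vs.Pairwise (· < ·)) (hne : vs ≠ []) :
    (PySem.List.pyRange (vs.headD 0) (vs.getLastD 0 + 1) 1).filter (fun x => !(vs.contains x))
      = pvGaps vs := by
  induction vs with
  | nil => exact absurd rfl hne
  | cons a t ih =>
    cases t with
    | nil => simp [pvGaps, PySem.List.pyRange_one_singleton, List.filter]
    | cons b rest =>
      have hab : a < b := (List.pairwise_cons.1 h).1 b (by simp)
      have ht : (b :: rest).Pairwise (· < ·) := (List.pairwise_cons.1 h).2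
      have hbL : b ≤ (b :: rest).getLastD 0 := pv_head_le_getLastD b rest ht
      have hLcons : (a :: b :: rest).getLastD 0 = (b :: rest).getLastD 0 := by
        simp
      have hsplit : PySem.List.pyRange a ((b :: rest).getLastD 0 + 1) 1
          = PySem.List.pyRange a b 1 ++ PySem.List.pyRange b ((b :: rest).getLastD 0 + 1) 1 :=
        PySem.List.pyRange_one_append a b _ (le_of_lt hab) (by omega)
      have hmem_ge : ∀ x ∈ (b :: rest), b ≤ x := by
        intro x hx
        rcases List.mem_cons.1 hx with rfl | hx
        · exact le_refl x
        · exact le_of_lt ((List.pairwise_cons.1 ht).1 x hx)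
      -- first chunk: range(a, b) filtered against a :: b :: rest is range(a+1, b)
      have hfst : (PySem.List.pyRange a b 1).filter (fun x => !((a :: b :: rest).contains x))
          = PySem.List.pyRange (a + 1) b 1 := by
        rw [PySem.List.pyRange_one_cons hab, List.filter_cons]
        have ha : (!((a :: b :: rest).contains a)) = false := by simp
        rw [ha]
        simp only [Bool.false_eq_true, if_false]
        apply List.filter_eq_self.mpr
        intro x hx
        have hx' := PySem.List.mem_pyRange_one.1 hx
        have hnm : x ∉ (a :: b :: rest) := by
          intro hm
          rcases List.mem_cons.1 hm with rfl | hm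
          · omega
          · exact absurd (hmem_ge x hm) (by omega)
        simpa using hnm
      -- second chunk: the head a never occurs in range(b, L+1), so drop it from the filter
      have hsnd : (PySem.List.pyRange b ((b :: rest).getLastD 0 + 1) 1).filter
            (fun x => !((a :: b :: rest).contains x))
          = (PySem.List.pyRange b ((b :: rest).getLastD 0 + 1) 1).filter
            (fun x => !((b :: rest).contains x)) := by
        apply List.filter_congr
        intro x hx
        have hx' := PySem.List.mem_pyRange_one.1 hx
        have hxa : x ≠ a := by omega
        simp [hxa]
      calc (PySem.List.pyRange ((a :: b :: rest).headD 0) ((a :: b :: rest).getLastD 0 + 1) 1).filter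
              (fun x => !((a :: b :: rest).contains x))
          = (PySem.List.pyRange a b 1).filter (fun x => !((a :: b :: rest).contains x))
            ++ (PySem.List.pyRange b ((b :: rest).getLastD 0 + 1) 1).filter
              (fun x => !((a :: b :: rest).contains x)) := by
            rw [List.headD_cons, hLcons, hsplit, List.filter_append]
        _ = PySem.List.pyRange (a + 1) b 1 ++ pvGaps (b :: rest) := by
            rw [hfst, hsnd]
            rw [show (PySem.List.pyRange b ((b :: rest).getLastD 0 + 1) 1)
              = (PySem.List.pyRange ((b :: rest).headD 0) ((b :: rest).getLastD 0 + 1) 1) from rfl]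
            rw [ih ht (by simp)]
        _ = pvGaps (a :: b :: rest) := rfl

lemma pv_pyGetD_zero_headD (vs : List Int) (hne : vs ≠ []) :
    PySem.List.pyGetD vs 0 0 = vs.headD 0 := by
  cases vs with
  | nil => exact absurd rfl hne
  | cons a t => simp [PySem.List.pyGetD_zero_cons]

lemma pv_pyGetD_neg_one_getLastD (vs : List Int) (hne : vs ≠ []) :
    PySem.List.pyGetD vs (-1) 0 = vs.getLastD 0 := by
  rw [PySem.List.pyGetD_neg_one vs 0 hne]
  cases vs with
  | nil => exact absurd rfl hne
  | cons a t => simp [List.getLast_eq_getLastD, List.getLast?_cons]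

-- ===== VERDICT (by name: the statement is the Claim_ definition above) =====
theorem describe_rooms_py_spec : Claim_equal_describe_rooms_py := by
  intro values _
  unfold Spec_describe_rooms_py describe_rooms_py describe_rooms_py_alt
  by_cases hv : values = []
  · simp [hv]
  · simp only [if_neg hv]
    set vs := PySem.List.sorted (PySem.Set.ofList values) (fun x => x) false with hvs
    have hpair : vs.Pairwise (· < ·) := PySem.List.sorted_ofList_pairwise_lt values
    have hne : vs ≠ [] := by
      cases values with
      | nil => exact absurd rfl hv
      | cons v t =>
        intro h0
        have hm : v ∈ PySem.Set.ofList (v :: t) := (PySem.Set.mem_ofList (xs := v :: t) (y := v)).2 (by simp)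
        have := (PySem.List.mem_sorted (xs := PySem.Set.ofList (v :: t))
          (key := fun x => x) (rev := false) (x := v)).2 hm
        rw [← hvs, h0] at this
        simp at this
    obtain ⟨a, t, hcons⟩ := List.exists_cons_of_ne_nil hne
    have hfirst : PySem.List.pyGetD vs 0 0 = a := by
      rw [hcons]; simp [PySem.List.pyGetD_zero_cons]
    have hlast : PySem.List.pyGetD vs (-1) 0 = vs.getLastD 0 :=
      pv_pyGetD_neg_one_getLastD vs hne
    have hmiss : (PySem.List.pyRange (PySem.List.pyGetD vs 0 0)
          (PySem.List.pyGetD vs (-1) 0 + 1) 1).filter (fun x => !(vs.contains x))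
        = pvGaps vs := by
      rw [hlast, pv_pyGetD_zero_headD vs hne]
      exact pvFilter_gaps vs hpair hne
    have hslice : PySem.List.slice vs (some 1) none = t := by
      rw [PySem.List.slice_from_one, hcons, List.tail_cons]
    have hfold : (PySem.List.slice vs (some 1) none).foldl
        (fun (st : Int × List String) v => (v, st.2 ++ pvGapStrs (st.1 + 1) v))
        (PySem.List.pyGetD vs 0 0, [])
        = (vs.getLastD 0, (pvGaps vs).map PySem.Int.toStr) := by
      rw [hslice, hfirst, pvFold_eq, ← hcons]
      simp
    simp only [hmiss, hfold]
    simp only [hfirst, hlast, ne_eq, List.map_eq_nil_iff]
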